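-- pv_equiv track=rewrite | github.com/cdgn-coding/leetcode-practice-guide | graph/snakes_ladders/solution.py | generatePositions
-- ===== SOURCE A (Python) =====
-- from typing import List, Dict, Tuple
--
-- def generatePositions(n: int) -> Dict:
--     row = n - 1
--     col = 0
--     pos = {}
--     ltr = True
--     for curr in range(1, n ** 2 + 1):
--         pos[curr] = (row, col)
--         if curr % n == 0:
--             ltr = not ltr
--             row -= 1
--         else:
--             col = col + 1 if ltr else col - 1
--     return pos
-- ===== SOURCE B (Python) =====
-- def generatePositions(n: int) -> dict:
--     pos = {}
--     for curr in range(1, n ** 2 + 1):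
--         idx = curr - 1
--         seg = idx // n
--         offset = idx - seg * n
--         pos[curr] = (n - 1 - seg, offset if seg % 2 == 0 else n - 1 - offset)
--     return pos
-- ===== Notes on version B (the rewrite author's own statement) =====
-- stated objective: simpler
-- what changed: Replaces A's incremental state machine (row/col/ltr carried across iterations with a flip on multiples of n) by a stateless closed-form computation of each cell's coordinates from its index (seg = (curr-1)//n, offset, parity of seg).
-- intended difference: On negative n, a meaningless board size neither program was written for, A returns a zig-zag that flips at multiples of |n| (an accident of its curr % n test) while B's closed form extends its per-cell formula unchanged; neither value is specified and B's is the natural one for its formula. — e.g. on generatePositions(-2): A returns [(1, -3, 0), (2, -3, 1), (3, -4, 1), (4, -4, 0)], B returns [(1, -3, 0), (2, -2, -2), (3, -2, -3), (4, -1, -1)]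
import Mathlib
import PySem

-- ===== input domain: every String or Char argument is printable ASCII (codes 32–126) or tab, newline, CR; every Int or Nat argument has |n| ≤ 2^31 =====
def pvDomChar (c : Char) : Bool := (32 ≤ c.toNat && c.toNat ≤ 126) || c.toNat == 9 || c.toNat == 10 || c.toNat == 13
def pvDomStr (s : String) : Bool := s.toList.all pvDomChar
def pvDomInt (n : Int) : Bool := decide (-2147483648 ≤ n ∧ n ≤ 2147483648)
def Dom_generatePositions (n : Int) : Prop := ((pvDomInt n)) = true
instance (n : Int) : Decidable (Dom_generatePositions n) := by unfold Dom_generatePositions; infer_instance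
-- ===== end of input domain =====

-- B replaces A's carried row/col/ltr state machine by a per-cell closed-form coordinate
-- computation (objective: simpler); on negative n (meaningless input) the two differ — see D_.

-- ===== PORT A =====
def generatePositions (n : Int) : List (Int × Int × Int) :=
  let final := (PySem.List.pyRange 1 (n ^ 2 + 1) 1).foldl
    (fun (st : Int × Int × PySem.Dict Int (Int × Int) × Bool) curr =>
      let row := st.1
      let col := st.2.1
      let pos := st.2.2.1
      let ltr := st.2.2.2
      let pos := pos.insert curr (row, col)
      if PySem.Int.mod curr n == 0 then
        (row - 1, col, pos, !ltr)
      else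
        (row, (if ltr then col + 1 else col - 1), pos, ltr))
    (n - 1, 0, PySem.Dict.empty, true)
  final.2.2.1.items

-- ===== PORT B =====
def generatePositions_alt (n : Int) : List (Int × Int × Int) :=
  ((PySem.List.pyRange 1 (n ^ 2 + 1) 1).foldl
    (fun (pos : PySem.Dict Int (Int × Int)) curr =>
      let idx := curr - 1
      let seg := PySem.Int.floordiv idx n
      let offset := idx - seg * n
      pos.insert curr
        (n - 1 - seg, if PySem.Int.mod seg 2 == 0 then offset else n - 1 - offset))
    PySem.Dict.empty).items

-- ===== PRECONDITION & SPEC =====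
-- On negative n — a board size with no meaning, which neither program was written for — A's
-- zig-zag flips direction at multiples of |n| (an accident of its curr % n test) while B's
-- closed form extends its per-cell formula; B's value is the natural one for its formula and
-- neither behaviour is specified, so the difference is stated rather than reproduced.
def D_generatePositions (n : Int) : Prop := n < 0
instance (n : Int) : Decidable (D_generatePositions n) := by unfold D_generatePositions; infer_instance

def Spec_generatePositions (n : Int) (out : List (Int × Int × Int)) : Prop := ¬ D_generatePositions n → out = generatePositions_alt n
instance (n : Int) (out : List (Int × Int × Int)) : Decidable (Spec_generatePositions n out) := by unfold Spec_generatePositions; infer_instance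

def pvDiffWitness_generatePositions : Int := -2
def pvDiffWitnessOut_generatePositions : (List (Int × Int × Int)) × (List (Int × Int × Int)) :=
  ([(1, -3, 0), (2, -3, 1), (3, -4, 1), (4, -4, 0)],
   [(1, -3, 0), (2, -2, -2), (3, -2, -3), (4, -1, -1)])

-- ===== CLAIM (what is proved, stated in full; the proofs are below) =====
def Claim_unchanged_generatePositions : Prop := ∀ (n : Int), Dom_generatePositions n → Spec_generatePositions n (generatePositions n)
def Claim_changed_generatePositions : Prop := Dom_generatePositions (pvDiffWitness_generatePositions) ∧ D_generatePositions (pvDiffWitness_generatePositions) ∧ generatePositions (pvDiffWitness_generatePositions) = pvDiffWitnessOut_generatePositions.1 ∧ generatePositions_alt (pvDiffWitness_generatePositions) = pvDiffWitnessOut_generatePositions.2 ∧ pvDiffWitnessOut_generatePositions.1 ≠ pvDiffWitnessOut_generatePositions.2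

-- ===== LEMMAS AND PROOFS =====

-- B's per-cell closed form, as a named function (identical to the body of the lambda in
-- generatePositions_alt).
def pvCellB (n c : Int) : Int × Int :=
  let idx := c - 1
  let seg := PySem.Int.floordiv idx n
  let offset := idx - seg * n
  (n - 1 - seg, if PySem.Int.mod seg 2 == 0 then offset else n - 1 - offset)

-- The column of A's cursor after t processed cells, in closed form.
def pvColF (n : Int) (t : Nat) : Int :=
  if (t / n.natAbs) % 2 = 0 then ((t % n.natAbs : Nat) : Int)
  else (n.natAbs : Int) - 1 - ((t % n.natAbs : Nat) : Int)

lemma pvB_items (n : Int) :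
    generatePositions_alt n
      = (PySem.List.pyRange 1 (n ^ 2 + 1) 1).map (fun c => (c, pvCellB n c)) := by
  show ((PySem.List.pyRange 1 (n ^ 2 + 1) 1).foldl
      (fun (d : PySem.Dict Int (Int × Int)) c => d.insert c (pvCellB n c))
      PySem.Dict.empty).items = _
  rw [PySem.Dict.items_foldl_insert_fresh (k := fun c => c) (v := pvCellB n)]
  · rfl
  · intro a _; simp [PySem.Dict.contains_empty]
  · simpa using PySem.List.nodup_pyRange_one 1 (n ^ 2 + 1)

lemma pvCellB_closed (n : Int) (hn : 0 < n) (t : Nat) :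
    pvCellB n ((t : Int) + 1) = (n - 1 - ((t / n.natAbs : Nat) : Int), pvColF n t) := by
  have hcast : n = (n.natAbs : Int) := (Int.natAbs_of_nonneg hn.le).symm
  rw [hcast]
  have hdm := Nat.div_add_mod t n.natAbs
  have hdmI : (n.natAbs : Int) * ((t / n.natAbs : Nat) : Int) + ((t % n.natAbs : Nat) : Int)
      = (t : Int) := by exact_mod_cast hdm
  unfold pvCellB pvColF
  simp only [add_sub_cancel_right, Int.natAbs_natCast]
  rw [PySem.Int.floordiv_natCast]
  have hoff : (t : Int) - ((t / n.natAbs : Nat) : Int) * (n.natAbs : Int)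
      = ((t % n.natAbs : Nat) : Int) := by linarith [hdmI]
  rw [hoff]
  have hmod2 : PySem.Int.mod ((t / n.natAbs : Nat) : Int) 2
      = (((t / n.natAbs) % 2 : Nat) : Int) := by
    exact_mod_cast PySem.Int.mod_natCast (t / n.natAbs) 2
  rw [hmod2]
  simp only [beq_iff_eq, Nat.cast_eq_zero]

-- Arithmetic of t ↦ t+1 for division by a positive m.
lemma pvSuccDiv (m t : Nat) (hm : 0 < m) (hd : m ∣ t + 1) :
    (t + 1) / m = t / m + 1 ∧ (t + 1) % m = 0 ∧ t % m = m - 1 := by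
  have h1 : (t + 1) / m = t / m + 1 := by rw [Nat.succ_div, if_pos hd]
  have h2 : (t + 1) % m = 0 := by
    obtain ⟨q, hq⟩ := hd; rw [hq]; exact Nat.mul_mod_right m q
  exact ⟨h1, h2, by
    have hb := Nat.div_add_mod t m
    have hb' := Nat.div_add_mod (t + 1) m
    rw [h1, h2, Nat.mul_succ] at hb'
    generalize m * (t / m) = q at hb hb'
    omega⟩

lemma pvSuccNotDiv (m t : Nat) (hd : ¬ m ∣ t + 1) :
    (t + 1) / m = t / m ∧ (t + 1) % m = t % m + 1 := by
  have h1 : (t + 1) / m = t / m := by rw [Nat.succ_div, if_neg hd]; exact Nat.add_zero _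
  refine ⟨h1, ?_⟩
  have hb := Nat.div_add_mod t m
  have hb' := Nat.div_add_mod (t + 1) m
  rw [h1] at hb'
  generalize m * (t / m) = q at hb hb'
  omega

-- A's loop invariant: after t iterations the whole state is in closed form.
lemma pvA_inv (n : Int) (hn : 0 < n) (t : Nat) :
    (PySem.List.pyRange 1 ((t : Int) + 1) 1).foldl
      (fun (st : Int × Int × PySem.Dict Int (Int × Int) × Bool) curr =>
        let row := st.1
        let col := st.2.1
        let pos := st.2.2.1
        let ltr := st.2.2.2
        let pos := pos.insert curr (row, col)
        if PySem.Int.mod curr n == 0 then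
          (row - 1, col, pos, !ltr)
        else
          (row, (if ltr then col + 1 else col - 1), pos, ltr))
      (n - 1, 0, PySem.Dict.empty, true)
    = (n - 1 - ((t / n.natAbs : Nat) : Int), pvColF n t,
       PySem.Dict.mk ((PySem.List.pyRange 1 ((t : Int) + 1) 1).map (fun c => (c, pvCellB n c))),
       decide ((t / n.natAbs) % 2 = 0)) := by
  have hm : 0 < n.natAbs := Int.natAbs_pos.mpr hn.ne'
  induction t with
  | zero =>
      rw [show ((0 : Nat) : Int) + 1 = 1 by norm_num,
        PySem.List.pyRange_one_eq_nil le_rfl]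
      simp [pvColF, PySem.Dict.empty]
  | succ t ih =>
      have hrange : PySem.List.pyRange 1 (((t + 1 : Nat) : Int) + 1) 1
          = PySem.List.pyRange 1 ((t : Int) + 1) 1 ++ [(t : Int) + 1] := by
        have h := PySem.List.pyRange_one_succ_right (a := 1) (b := (t : Int) + 1) (by omega)
        rw [show (((t + 1 : Nat) : Int) + 1) = ((t : Int) + 1) + 1 by push_cast; ring]
        exact h
      rw [hrange, List.foldl_append, ih]
      simp only [List.foldl_cons, List.foldl_nil, List.map_append, List.map_cons, List.map_nil]
      have hcell := pvCellB_closed n hn t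
      have hfresh : (PySem.Dict.mk ((PySem.List.pyRange 1 ((t : Int) + 1) 1).map
          (fun c => (c, pvCellB n c)))).contains ((t : Int) + 1) = false := by
        rw [PySem.Dict.contains_eq_decide_mem_keys]
        simp only [decide_eq_false_iff_not, PySem.Dict.keys_mk, List.map_map, List.mem_map]
        rintro ⟨c, hc, hc'⟩
        have := (PySem.List.mem_pyRange_one).mp hc
        simp only [Function.comp] at hc'
        omega
      have hins : (PySem.Dict.mk ((PySem.List.pyRange 1 ((t : Int) + 1) 1).map
            (fun c => (c, pvCellB n c)))).insert ((t : Int) + 1)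
              (n - 1 - ((t / n.natAbs : Nat) : Int), pvColF n t)
          = PySem.Dict.mk ((PySem.List.pyRange 1 ((t : Int) + 1) 1).map
              (fun c => (c, pvCellB n c)) ++ [((t : Int) + 1, pvCellB n ((t : Int) + 1))]) := by
        apply PySem.Dict.ext
        rw [PySem.Dict.items_insert_of_not_contains _ _ hfresh, hcell]
      have hdvd_iff : (PySem.Int.mod ((t : Int) + 1) n == 0) = true ↔ n.natAbs ∣ (t + 1) := by
        rw [beq_iff_eq, PySem.Int.mod_eq_zero_iff_dvd]
        rw [show ((t : Int) + 1) = ((t + 1 : Nat) : Int) by push_cast; ring]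
        rw [← Int.natAbs_dvd]
        exact Int.natCast_dvd_natCast
      by_cases hd : n.natAbs ∣ (t + 1)
      · rw [if_pos (hdvd_iff.mpr hd)]
        obtain ⟨h1, h2, h3⟩ := pvSuccDiv n.natAbs t hm hd
        simp only [Prod.mk.injEq]
        refine ⟨?_, ?_, ?_, ?_⟩
        · rw [h1]; push_cast; ring
        · unfold pvColF
          rw [h1, h2, h3]
          split_ifs <;> omega
        · rw [hins]
        · rw [h1]
          rw [← decide_not]
          exact decide_eq_decide.mpr (by omega)
      · rw [if_neg (fun h => hd (hdvd_iff.mp h))]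
        obtain ⟨h1, h2⟩ := pvSuccNotDiv n.natAbs t hd
        simp only [Prod.mk.injEq]
        refine ⟨?_, ?_, ?_, ?_⟩
        · rw [h1]
        · simp only [decide_eq_true_eq]
          unfold pvColF
          rw [h1, h2]
          split_ifs <;> omega
        · rw [hins]
        · rw [h1]

-- ===== VERDICT (by name: the statement is the Claim_ definition above) =====
theorem generatePositions_spec : Claim_unchanged_generatePositions := by
  intro n _ hnd
  have hpre : (0 : Int) ≤ n := by
    by_contra h; exact hnd (by unfold D_generatePositions; omega)
  rcases lt_or_eq_of_le hpre with hn | hn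
  · have hsq : (n ^ 2 : Int) = ((n.natAbs * n.natAbs : Nat) : Int) := by
      rw [Int.natAbs_mul_self]; ring
    rw [pvB_items]
    simp only [generatePositions]
    rw [hsq, pvA_inv n hn (n.natAbs * n.natAbs)]
  · subst hn
    simp [generatePositions, generatePositions_alt,
      PySem.List.pyRange_one_eq_nil (by norm_num : (1:Int) ≤ 1)]

theorem generatePositions_changed : Claim_changed_generatePositions := by
  unfold Claim_changed_generatePositions; decide
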